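-- pv_equiv track=rewrite | github.com/aitechmaniaanoia/Ride-hailing-Order-Demand-Prediction-for-Regions-with-Sparse-Demand | draw.py | time_to_str
-- ===== SOURCE A (Python) =====
-- def time_to_str(t):
--     mon_lens = [31,28,31,30,31,30,31,31,30,31,30,31]
--     #mon_lens = [2 for _ in range(12)]
--     mon_lens = [2*24*l for l in mon_lens]
--     i = 0
--     while sum(mon_lens[:i+1]) < t:
--         i+=1
--     if i > 0:
--         t = t - sum(mon_lens[:i])
--     day = 1+(t//48)
--     hour = (t%48)//2
--     half = 30*(t%2)
--     return "2019/%d/%d %02d:%02d"%(i+1,day,hour,half)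
-- ===== SOURCE B (Python) =====
-- def time_to_str(t):
--     # Binary search over precomputed cumulative month ends (in half-hour units),
--     # instead of a linear scan that re-sums prefixes of the month-length table.
--     cum = (1488, 2832, 4320, 5760, 7248, 8688, 10176, 11664, 13104, 14592, 16032, 17520)
--     lo, hi = 0, 12
--     while lo < hi:
--         mid = (lo + hi) // 2
--         if cum[mid] < t:
--             lo = mid + 1
--         else:
--             hi = mid
--     rem = t - cum[lo - 1] if lo > 0 else t
--     return "2019/%d/%d %02d:%02d" % (lo + 1, 1 + rem // 48, (rem % 48) // 2, 30 * (rem % 2))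
-- ===== Notes on version B (the rewrite author's own statement) =====
-- stated objective: alternative
-- what changed: B replaces A's linear while-loop that re-slices and re-sums the month-length prefix on every test with a binary search over a precomputed table of cumulative month ends, then subtracts the preceding cumulative end once.
import Mathlib
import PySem

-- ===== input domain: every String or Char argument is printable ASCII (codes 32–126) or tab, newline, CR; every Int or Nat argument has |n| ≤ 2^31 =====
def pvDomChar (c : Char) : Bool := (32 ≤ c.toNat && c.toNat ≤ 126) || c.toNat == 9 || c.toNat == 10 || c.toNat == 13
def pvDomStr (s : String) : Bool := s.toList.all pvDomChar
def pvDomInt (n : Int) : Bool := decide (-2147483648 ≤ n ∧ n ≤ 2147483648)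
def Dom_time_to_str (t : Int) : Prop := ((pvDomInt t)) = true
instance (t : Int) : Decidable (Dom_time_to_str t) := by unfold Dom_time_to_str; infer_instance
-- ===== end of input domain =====

-- B finds the month by binary search over precomputed cumulative month ends instead of
-- A's linear scan with re-summed prefixes (objective: alternative algorithm; same output).


-- ===== PORT A =====

-- "%02d" for the (always nonnegative, < 100 here) hour/half values
def pad2 (n : Int) : String :=
  let s := PySem.Int.toStr n
  if s.length < 2 then "0" ++ s else s

-- the shared format string "2019/%d/%d %02d:%02d" of both Pythons
def pyFmt (mon day hour half : Int) : String :=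
  "2019/" ++ PySem.Int.toStr mon ++ "/" ++ PySem.Int.toStr day ++ " " ++
    pad2 hour ++ ":" ++ pad2 half

-- A's `while sum(mon_lens[:i+1]) < t: i+=1`; the guard i < 12 only makes the
-- recursion total (for t > 17520 Python A loops forever; excluded by Pre_).
-- (fuel 12 only makes the recursion total: the loop can increment i at most 12
-- times before the guard fails on the inputs Pre_ admits)
def findA (mon : List Int) (t : Int) : Nat → Int → Int
  | 0, i => i
  | Nat.succ fuel, i =>
    if (PySem.List.slice mon none (some (i+1))).sum < t then findA mon t fuel (i+1) else i

def time_to_str (t : Int) : String :=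
  let mon_lens : List Int := [31,28,31,30,31,30,31,31,30,31,30,31]
  let mon_lens : List Int := mon_lens.map (fun l => 2*24*l)
  let i := findA mon_lens t 12 0
  let t := if i > 0 then t - (PySem.List.slice mon_lens none (some i)).sum else t
  pyFmt (i+1) (1 + PySem.Int.floordiv t 48)
    (PySem.Int.floordiv (PySem.Int.mod t 48) 2) (30 * PySem.Int.mod t 2)

-- ===== PORT B =====

-- B's precomputed tuple of cumulative month ends in half-hour units
def cumB : List Int := [1488, 2832, 4320, 5760, 7248, 8688, 10176, 11664, 13104, 14592, 16032, 17520]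

-- B's binary-search loop `while lo < hi: ...`. Python's lo, hi stay in [0, 12]
-- (nonnegative), so Nat and `(lo+hi)/2` match Python's int and `//` exactly;
-- cum[mid] always has 0 ≤ mid < 12, so getD never takes its default.
-- (fuel 12 only makes the recursion total: hi - lo starts at 12 and shrinks
-- every iteration)
def bsearchB (t : Int) : Nat → Nat → Nat → Nat
  | 0, lo, _ => lo
  | Nat.succ fuel, lo, hi =>
    if lo < hi then
      let mid := (lo + hi) / 2
      if cumB.getD mid 0 < t then bsearchB t fuel (mid + 1) hi else bsearchB t fuel lo mid
    else lo

def time_to_str_alt (t : Int) : String :=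
  let lo := bsearchB t 12 0 12
  let rem := if lo > 0 then t - cumB.getD (lo - 1) 0 else t
  pyFmt ((lo : Int) + 1) (1 + PySem.Int.floordiv rem 48)
    (PySem.Int.floordiv (PySem.Int.mod rem 48) 2) (30 * PySem.Int.mod rem 2)

-- ===== PRECONDITION & SPEC =====
-- Pre_ excludes t > 17520 (past the year's 48*365 half-hours), where Python A's
-- while-loop never terminates (the slice sum clamps at the full-year total).
def Pre_time_to_str (t : Int) : Prop := t ≤ 17520
instance (t : Int) : Decidable (Pre_time_to_str t) := by unfold Pre_time_to_str; infer_instance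

def pvWitness_time_to_str : Int := (4321)

def Spec_time_to_str (t : Int) (out : String) : Prop := out = time_to_str_alt t
instance (t : Int) (out : String) : Decidable (Spec_time_to_str t out) := by unfold Spec_time_to_str; infer_instance

-- ===== CLAIM (what is proved, stated in full; the proofs are below) =====
def Claim_equal_time_to_str : Prop := ∀ (t : Int), Dom_time_to_str t → Pre_time_to_str t → Spec_time_to_str t (time_to_str t)

-- ===== LEMMAS AND PROOFS =====

set_option maxHeartbeats 1600000 in
theorem key (t : Int) (ht : t ≤ 17520) : time_to_str t = time_to_str_alt t := by
  have hml : (List.map (fun l => 2*24*l) ([31,28,31,30,31,30,31,31,30,31,30,31]:List Int)) = [1488, 1344, 1488, 1440, 1488, 1440, 1488, 1488, 1440, 1488, 1440, 1488] := by decide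
  have s1 : (PySem.List.slice ([1488, 1344, 1488, 1440, 1488, 1440, 1488, 1488, 1440, 1488, 1440, 1488]:List Int) none (some 1)).sum = 1488 := by decide
  have s2 : (PySem.List.slice ([1488, 1344, 1488, 1440, 1488, 1440, 1488, 1488, 1440, 1488, 1440, 1488]:List Int) none (some 2)).sum = 2832 := by decide
  have s3 : (PySem.List.slice ([1488, 1344, 1488, 1440, 1488, 1440, 1488, 1488, 1440, 1488, 1440, 1488]:List Int) none (some 3)).sum = 4320 := by decide
  have s4 : (PySem.List.slice ([1488, 1344, 1488, 1440, 1488, 1440, 1488, 1488, 1440, 1488, 1440, 1488]:List Int) none (some 4)).sum = 5760 := by decide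
  have s5 : (PySem.List.slice ([1488, 1344, 1488, 1440, 1488, 1440, 1488, 1488, 1440, 1488, 1440, 1488]:List Int) none (some 5)).sum = 7248 := by decide
  have s6 : (PySem.List.slice ([1488, 1344, 1488, 1440, 1488, 1440, 1488, 1488, 1440, 1488, 1440, 1488]:List Int) none (some 6)).sum = 8688 := by decide
  have s7 : (PySem.List.slice ([1488, 1344, 1488, 1440, 1488, 1440, 1488, 1488, 1440, 1488, 1440, 1488]:List Int) none (some 7)).sum = 10176 := by decide
  have s8 : (PySem.List.slice ([1488, 1344, 1488, 1440, 1488, 1440, 1488, 1488, 1440, 1488, 1440, 1488]:List Int) none (some 8)).sum = 11664 := by decide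
  have s9 : (PySem.List.slice ([1488, 1344, 1488, 1440, 1488, 1440, 1488, 1488, 1440, 1488, 1440, 1488]:List Int) none (some 9)).sum = 13104 := by decide
  have s10 : (PySem.List.slice ([1488, 1344, 1488, 1440, 1488, 1440, 1488, 1488, 1440, 1488, 1440, 1488]:List Int) none (some 10)).sum = 14592 := by decide
  have s11 : (PySem.List.slice ([1488, 1344, 1488, 1440, 1488, 1440, 1488, 1488, 1440, 1488, 1440, 1488]:List Int) none (some 11)).sum = 16032 := by decide
  have s12 : (PySem.List.slice ([1488, 1344, 1488, 1440, 1488, 1440, 1488, 1488, 1440, 1488, 1440, 1488]:List Int) none (some 12)).sum = 17520 := by decide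
  rw [time_to_str, time_to_str_alt, hml]
  by_cases h0 : t ≤ (1488:Int)
  · have hb : bsearchB t 12 0 12 = 0 := by simp [bsearchB, cumB, (show ¬((1488:Int) < t) from by omega), (show ¬((2832:Int) < t) from by omega), (show ¬((4320:Int) < t) from by omega), (show ¬((5760:Int) < t) from by omega), (show ¬((7248:Int) < t) from by omega), (show ¬((8688:Int) < t) from by omega), (show ¬((10176:Int) < t) from by omega), (show ¬((11664:Int) < t) from by omega), (show ¬((13104:Int) < t) from by omega), (show ¬((14592:Int) < t) from by omega), (show ¬((16032:Int) < t) from by omega), (show ¬((17520:Int) < t) from by omega)]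
    have hA : findA ([1488, 1344, 1488, 1440, 1488, 1440, 1488, 1488, 1440, 1488, 1440, 1488]:List Int) t 12 0 = 0 := by simp [findA, s1, s2, s3, s4, s5, s6, s7, s8, s9, s10, s11, s12, (show ¬((1488:Int) < t) from by omega), (show ¬((2832:Int) < t) from by omega), (show ¬((4320:Int) < t) from by omega), (show ¬((5760:Int) < t) from by omega), (show ¬((7248:Int) < t) from by omega), (show ¬((8688:Int) < t) from by omega), (show ¬((10176:Int) < t) from by omega), (show ¬((11664:Int) < t) from by omega), (show ¬((13104:Int) < t) from by omega), (show ¬((14592:Int) < t) from by omega), (show ¬((16032:Int) < t) from by omega), (show ¬((17520:Int) < t) from by omega)]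
    rw [hb, hA]
    norm_num
  by_cases h1 : t ≤ (2832:Int)
  · have hb : bsearchB t 12 0 12 = 1 := by simp [bsearchB, cumB, (show (1488:Int) < t from by omega), (show ¬((2832:Int) < t) from by omega), (show ¬((4320:Int) < t) from by omega), (show ¬((5760:Int) < t) from by omega), (show ¬((7248:Int) < t) from by omega), (show ¬((8688:Int) < t) from by omega), (show ¬((10176:Int) < t) from by omega), (show ¬((11664:Int) < t) from by omega), (show ¬((13104:Int) < t) from by omega), (show ¬((14592:Int) < t) from by omega), (show ¬((16032:Int) < t) from by omega), (show ¬((17520:Int) < t) from by omega)]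
    have hA : findA ([1488, 1344, 1488, 1440, 1488, 1440, 1488, 1488, 1440, 1488, 1440, 1488]:List Int) t 12 0 = 1 := by simp [findA, s1, s2, s3, s4, s5, s6, s7, s8, s9, s10, s11, s12, (show (1488:Int) < t from by omega), (show ¬((2832:Int) < t) from by omega), (show ¬((4320:Int) < t) from by omega), (show ¬((5760:Int) < t) from by omega), (show ¬((7248:Int) < t) from by omega), (show ¬((8688:Int) < t) from by omega), (show ¬((10176:Int) < t) from by omega), (show ¬((11664:Int) < t) from by omega), (show ¬((13104:Int) < t) from by omega), (show ¬((14592:Int) < t) from by omega), (show ¬((16032:Int) < t) from by omega), (show ¬((17520:Int) < t) from by omega)]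
    rw [hb, hA]
    norm_num [s1, cumB]
  by_cases h2 : t ≤ (4320:Int)
  · have hb : bsearchB t 12 0 12 = 2 := by simp [bsearchB, cumB, (show (1488:Int) < t from by omega), (show (2832:Int) < t from by omega), (show ¬((4320:Int) < t) from by omega), (show ¬((5760:Int) < t) from by omega), (show ¬((7248:Int) < t) from by omega), (show ¬((8688:Int) < t) from by omega), (show ¬((10176:Int) < t) from by omega), (show ¬((11664:Int) < t) from by omega), (show ¬((13104:Int) < t) from by omega), (show ¬((14592:Int) < t) from by omega), (show ¬((16032:Int) < t) from by omega), (show ¬((17520:Int) < t) from by omega)]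
    have hA : findA ([1488, 1344, 1488, 1440, 1488, 1440, 1488, 1488, 1440, 1488, 1440, 1488]:List Int) t 12 0 = 2 := by simp [findA, s1, s2, s3, s4, s5, s6, s7, s8, s9, s10, s11, s12, (show (1488:Int) < t from by omega), (show (2832:Int) < t from by omega), (show ¬((4320:Int) < t) from by omega), (show ¬((5760:Int) < t) from by omega), (show ¬((7248:Int) < t) from by omega), (show ¬((8688:Int) < t) from by omega), (show ¬((10176:Int) < t) from by omega), (show ¬((11664:Int) < t) from by omega), (show ¬((13104:Int) < t) from by omega), (show ¬((14592:Int) < t) from by omega), (show ¬((16032:Int) < t) from by omega), (show ¬((17520:Int) < t) from by omega)]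
    rw [hb, hA]
    norm_num [s2, cumB]
  by_cases h3 : t ≤ (5760:Int)
  · have hb : bsearchB t 12 0 12 = 3 := by simp [bsearchB, cumB, (show (1488:Int) < t from by omega), (show (2832:Int) < t from by omega), (show (4320:Int) < t from by omega), (show ¬((5760:Int) < t) from by omega), (show ¬((7248:Int) < t) from by omega), (show ¬((8688:Int) < t) from by omega), (show ¬((10176:Int) < t) from by omega), (show ¬((11664:Int) < t) from by omega), (show ¬((13104:Int) < t) from by omega), (show ¬((14592:Int) < t) from by omega), (show ¬((16032:Int) < t) from by omega), (show ¬((17520:Int) < t) from by omega)]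
    have hA : findA ([1488, 1344, 1488, 1440, 1488, 1440, 1488, 1488, 1440, 1488, 1440, 1488]:List Int) t 12 0 = 3 := by simp [findA, s1, s2, s3, s4, s5, s6, s7, s8, s9, s10, s11, s12, (show (1488:Int) < t from by omega), (show (2832:Int) < t from by omega), (show (4320:Int) < t from by omega), (show ¬((5760:Int) < t) from by omega), (show ¬((7248:Int) < t) from by omega), (show ¬((8688:Int) < t) from by omega), (show ¬((10176:Int) < t) from by omega), (show ¬((11664:Int) < t) from by omega), (show ¬((13104:Int) < t) from by omega), (show ¬((14592:Int) < t) from by omega), (show ¬((16032:Int) < t) from by omega), (show ¬((17520:Int) < t) from by omega)]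
    rw [hb, hA]
    norm_num [s3, cumB]
  by_cases h4 : t ≤ (7248:Int)
  · have hb : bsearchB t 12 0 12 = 4 := by simp [bsearchB, cumB, (show (1488:Int) < t from by omega), (show (2832:Int) < t from by omega), (show (4320:Int) < t from by omega), (show (5760:Int) < t from by omega), (show ¬((7248:Int) < t) from by omega), (show ¬((8688:Int) < t) from by omega), (show ¬((10176:Int) < t) from by omega), (show ¬((11664:Int) < t) from by omega), (show ¬((13104:Int) < t) from by omega), (show ¬((14592:Int) < t) from by omega), (show ¬((16032:Int) < t) from by omega), (show ¬((17520:Int) < t) from by omega)]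
    have hA : findA ([1488, 1344, 1488, 1440, 1488, 1440, 1488, 1488, 1440, 1488, 1440, 1488]:List Int) t 12 0 = 4 := by simp [findA, s1, s2, s3, s4, s5, s6, s7, s8, s9, s10, s11, s12, (show (1488:Int) < t from by omega), (show (2832:Int) < t from by omega), (show (4320:Int) < t from by omega), (show (5760:Int) < t from by omega), (show ¬((7248:Int) < t) from by omega), (show ¬((8688:Int) < t) from by omega), (show ¬((10176:Int) < t) from by omega), (show ¬((11664:Int) < t) from by omega), (show ¬((13104:Int) < t) from by omega), (show ¬((14592:Int) < t) from by omega), (show ¬((16032:Int) < t) from by omega), (show ¬((17520:Int) < t) from by omega)]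
    rw [hb, hA]
    norm_num [s4, cumB]
  by_cases h5 : t ≤ (8688:Int)
  · have hb : bsearchB t 12 0 12 = 5 := by simp [bsearchB, cumB, (show (1488:Int) < t from by omega), (show (2832:Int) < t from by omega), (show (4320:Int) < t from by omega), (show (5760:Int) < t from by omega), (show (7248:Int) < t from by omega), (show ¬((8688:Int) < t) from by omega), (show ¬((10176:Int) < t) from by omega), (show ¬((11664:Int) < t) from by omega), (show ¬((13104:Int) < t) from by omega), (show ¬((14592:Int) < t) from by omega), (show ¬((16032:Int) < t) from by omega), (show ¬((17520:Int) < t) from by omega)]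
    have hA : findA ([1488, 1344, 1488, 1440, 1488, 1440, 1488, 1488, 1440, 1488, 1440, 1488]:List Int) t 12 0 = 5 := by simp [findA, s1, s2, s3, s4, s5, s6, s7, s8, s9, s10, s11, s12, (show (1488:Int) < t from by omega), (show (2832:Int) < t from by omega), (show (4320:Int) < t from by omega), (show (5760:Int) < t from by omega), (show (7248:Int) < t from by omega), (show ¬((8688:Int) < t) from by omega), (show ¬((10176:Int) < t) from by omega), (show ¬((11664:Int) < t) from by omega), (show ¬((13104:Int) < t) from by omega), (show ¬((14592:Int) < t) from by omega), (show ¬((16032:Int) < t) from by omega), (show ¬((17520:Int) < t) from by omega)]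
    rw [hb, hA]
    norm_num [s5, cumB]
  by_cases h6 : t ≤ (10176:Int)
  · have hb : bsearchB t 12 0 12 = 6 := by simp [bsearchB, cumB, (show (1488:Int) < t from by omega), (show (2832:Int) < t from by omega), (show (4320:Int) < t from by omega), (show (5760:Int) < t from by omega), (show (7248:Int) < t from by omega), (show (8688:Int) < t from by omega), (show ¬((10176:Int) < t) from by omega), (show ¬((11664:Int) < t) from by omega), (show ¬((13104:Int) < t) from by omega), (show ¬((14592:Int) < t) from by omega), (show ¬((16032:Int) < t) from by omega), (show ¬((17520:Int) < t) from by omega)]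
    have hA : findA ([1488, 1344, 1488, 1440, 1488, 1440, 1488, 1488, 1440, 1488, 1440, 1488]:List Int) t 12 0 = 6 := by simp [findA, s1, s2, s3, s4, s5, s6, s7, s8, s9, s10, s11, s12, (show (1488:Int) < t from by omega), (show (2832:Int) < t from by omega), (show (4320:Int) < t from by omega), (show (5760:Int) < t from by omega), (show (7248:Int) < t from by omega), (show (8688:Int) < t from by omega), (show ¬((10176:Int) < t) from by omega), (show ¬((11664:Int) < t) from by omega), (show ¬((13104:Int) < t) from by omega), (show ¬((14592:Int) < t) from by omega), (show ¬((16032:Int) < t) from by omega), (show ¬((17520:Int) < t) from by omega)]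
    rw [hb, hA]
    norm_num [s6, cumB]
  by_cases h7 : t ≤ (11664:Int)
  · have hb : bsearchB t 12 0 12 = 7 := by simp [bsearchB, cumB, (show (1488:Int) < t from by omega), (show (2832:Int) < t from by omega), (show (4320:Int) < t from by omega), (show (5760:Int) < t from by omega), (show (7248:Int) < t from by omega), (show (8688:Int) < t from by omega), (show (10176:Int) < t from by omega), (show ¬((11664:Int) < t) from by omega), (show ¬((13104:Int) < t) from by omega), (show ¬((14592:Int) < t) from by omega), (show ¬((16032:Int) < t) from by omega), (show ¬((17520:Int) < t) from by omega)]
    have hA : findA ([1488, 1344, 1488, 1440, 1488, 1440, 1488, 1488, 1440, 1488, 1440, 1488]:List Int) t 12 0 = 7 := by simp [findA, s1, s2, s3, s4, s5, s6, s7, s8, s9, s10, s11, s12, (show (1488:Int) < t from by omega), (show (2832:Int) < t from by omega), (show (4320:Int) < t from by omega), (show (5760:Int) < t from by omega), (show (7248:Int) < t from by omega), (show (8688:Int) < t from by omega), (show (10176:Int) < t from by omega), (show ¬((11664:Int) < t) from by omega), (show ¬((13104:Int) < t) from by omega), (show ¬((14592:Int) < t) from by omega), (show ¬((16032:Int) <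 t) from by omega), (show ¬((17520:Int) < t) from by omega)]
    rw [hb, hA]
    norm_num [s7, cumB]
  by_cases h8 : t ≤ (13104:Int)
  · have hb : bsearchB t 12 0 12 = 8 := by simp [bsearchB, cumB, (show (1488:Int) < t from by omega), (show (2832:Int) < t from by omega), (show (4320:Int) < t from by omega), (show (5760:Int) < t from by omega), (show (7248:Int) < t from by omega), (show (8688:Int) < t from by omega), (show (10176:Int) < t from by omega), (show (11664:Int) < t from by omega), (show ¬((13104:Int) < t) from by omega), (show ¬((14592:Int) < t) from by omega), (show ¬((16032:Int) < t) from by omega), (show ¬((17520:Int) < t) from by omega)]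
    have hA : findA ([1488, 1344, 1488, 1440, 1488, 1440, 1488, 1488, 1440, 1488, 1440, 1488]:List Int) t 12 0 = 8 := by simp [findA, s1, s2, s3, s4, s5, s6, s7, s8, s9, s10, s11, s12, (show (1488:Int) < t from by omega), (show (2832:Int) < t from by omega), (show (4320:Int) < t from by omega), (show (5760:Int) < t from by omega), (show (7248:Int) < t from by omega), (show (8688:Int) < t from by omega), (show (10176:Int) < t from by omega), (show (11664:Int) < t from by omega), (show ¬((13104:Int) < t) from by omega), (show ¬((14592:Int) < t) from by omega), (show ¬((16032:Int) < t) from by omega), (show ¬((17520:Int) < t) from by omega)]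
    rw [hb, hA]
    norm_num [s8, cumB]
  by_cases h9 : t ≤ (14592:Int)
  · have hb : bsearchB t 12 0 12 = 9 := by simp [bsearchB, cumB, (show (1488:Int) < t from by omega), (show (2832:Int) < t from by omega), (show (4320:Int) < t from by omega), (show (5760:Int) < t from by omega), (show (7248:Int) < t from by omega), (show (8688:Int) < t from by omega), (show (10176:Int) < t from by omega), (show (11664:Int) < t from by omega), (show (13104:Int) < t from by omega), (show ¬((14592:Int) < t) from by omega), (show ¬((16032:Int) < t) from by omega), (show ¬((17520:Int) < t) from by omega)]
    have hA : findA ([1488, 1344, 1488, 1440, 1488, 1440, 1488, 1488, 1440, 1488, 1440, 1488]:List Int) t 12 0 = 9 := by simp [findA, s1, s2, s3, s4, s5, s6, s7, s8, s9, s10, s11, s12, (show (1488:Int) < t from by omega), (show (2832:Int) < t from by omega), (show (4320:Int) < t from by omega), (show (5760:Int) < t from by omega), (show (7248:Int) < t from by omega), (show (8688:Int) < t from by omega), (show (10176:Int) < t from by omega), (show (11664:Int) < t from by omega), (show (13104:Int) < t from by omega), (show ¬((14592:Int) < t) from by omega), (show ¬((16032:Int) < t) from by omega), (show ¬((17520:Int)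 < t) from by omega)]
    rw [hb, hA]
    norm_num [s9, cumB]
  by_cases h10 : t ≤ (16032:Int)
  · have hb : bsearchB t 12 0 12 = 10 := by simp [bsearchB, cumB, (show (1488:Int) < t from by omega), (show (2832:Int) < t from by omega), (show (4320:Int) < t from by omega), (show (5760:Int) < t from by omega), (show (7248:Int) < t from by omega), (show (8688:Int) < t from by omega), (show (10176:Int) < t from by omega), (show (11664:Int) < t from by omega), (show (13104:Int) < t from by omega), (show (14592:Int) < t from by omega), (show ¬((16032:Int) < t) from by omega), (show ¬((17520:Int) < t) from by omega)]
    have hA : findA ([1488, 1344, 1488, 1440, 1488, 1440, 1488, 1488, 1440, 1488, 1440, 1488]:List Int) t 12 0 = 10 := by simp [findA, s1, s2, s3, s4, s5, s6, s7, s8, s9, s10, s11, s12, (show (1488:Int) < t from by omega), (show (2832:Int) < t from by omega), (show (4320:Int) < t from by omega), (show (5760:Int) < t from by omega), (show (7248:Int) < t from by omega), (show (8688:Int) < t from by omega), (show (10176:Int) < t from by omega), (show (11664:Int) < t from by omega), (show (13104:Int) < t from by omega), (show (14592:Int) < t from by omega), (show ¬((16032:Int) < t) from by omega), (show ¬((17520:Int)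 < t) from by omega)]
    rw [hb, hA]
    norm_num [s10, cumB]
  have hb : bsearchB t 12 0 12 = 11 := by simp [bsearchB, cumB, (show (1488:Int) < t from by omega), (show (2832:Int) < t from by omega), (show (4320:Int) < t from by omega), (show (5760:Int) < t from by omega), (show (7248:Int) < t from by omega), (show (8688:Int) < t from by omega), (show (10176:Int) < t from by omega), (show (11664:Int) < t from by omega), (show (13104:Int) < t from by omega), (show (14592:Int) < t from by omega), (show (16032:Int) < t from by omega), (show ¬((17520:Int) < t) from by omega)]
  have hA : findA ([1488, 1344, 1488, 1440, 1488, 1440, 1488, 1488, 1440, 1488, 1440, 1488]:List Int) t 12 0 = 11 := by simp [findA, s1, s2, s3, s4, s5, s6, s7, s8, s9, s10, s11, s12, (show (1488:Int) < t from by omega), (show (2832:Int) < t from by omega), (show (4320:Int) < t from by omega), (show (5760:Int) < t from by omega), (show (7248:Int) < t from by omega), (show (8688:Int) < t from by omega), (show (10176:Int) < t from by omega), (show (11664:Int) < t from by omega), (show (13104:Int) < t from by omega), (show (14592:Int) < t from by omega), (show (16032:Int) < t from by omega), (show ¬((17520:Int) < t) from by omega)]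
  rw [hb, hA]
  norm_num [s11, cumB]

-- ===== VERDICT (by name: the statement is the Claim_ definition above) =====
theorem time_to_str_spec : Claim_equal_time_to_str := by
  intro t _ hpre
  exact key t hpre
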